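-- pv_equiv track=rewrite | github.com/jhacksman/cmw | attempts/tested/2026-01-05-10b-combined/generate_10b.py | leet_phrase
-- ===== SOURCE A (Python) =====
-- import itertools
-- from typing import Generator, List, Iterator
--
-- LEET_CHAR = {
--     "a": ["a", "@", "4"],
--     "s": ["s", "$", "5"],
--     "e": ["e", "3"],
--     "i": ["i", "1", "!"],
--     "o": ["o", "0"],
--     "l": ["l", "1"],
--     "t": ["t", "7"],
--     # NOT using 7 for r - Dean confirmed never
-- }
--
-- LEET_WORDS = {
--     "pass": ["pass", "p455", "p@$$", "p4$$", "p@55", "pa55", "p@ss", "p4ss"],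
--     "password": [
--         "password", "p455word", "p@$$word", "p4$$word", "p@55word",
--         "pa55word", "p@ssword", "passw0rd", "p455w0rd", "p@$$w0rd",
--         "p4ssword", "p4ssw0rd", "p@55w0rd", "pa$$word", "pa55w0rd",
--     ],
--     "passphrase": [
--         "passphrase", "p455phrase", "p@$$phrase", "p4$$phrase",
--         "passphr4se", "p455phr4se", "p@$$phr4se", "p4ssphr4se",
--         "p@ssphr@se", "p455phr@se", "pa55phrase", "pa55phr4se",
--     ],
--     "bad": ["bad", "b4d", "b@d"],
--     "dumb": ["dumb", "d0mb", "durnb"],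
--     "stupid": ["stupid", "stup1d", "5tupid", "5tup1d", "s7upid"],
--     "weak": ["weak", "we4k", "w34k", "w3@k"],
--     "easy": ["easy", "e4sy", "3asy", "34sy", "e@sy"],
--     "simple": ["simple", "s1mple", "5imple", "51mple", "s!mple"],
--     "lame": ["lame", "l4me", "l@me", "1ame"],
--     "this": ["this", "th1s", "7his", "7h1s"],
--     "is": ["is", "1s", "!s"],
-- }
--
-- def leet_word(word: str) -> Iterator[str]:
--     """Generate all leetspeak variants of a word."""
--     w = word.lower()
--     if w in LEET_WORDS:
--         yield from LEET_WORDS[w]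
--         return
--
--     yield word
--
--     # Character substitutions
--     positions = [(i, LEET_CHAR[c.lower()]) for i, c in enumerate(word) if c.lower() in LEET_CHAR]
--
--     if not positions:
--         return
--
--     # Generate combinations of substitutions (up to 4 positions for more coverage)
--     for r in range(1, min(5, len(positions) + 1)):
--         for combo in itertools.combinations(range(len(positions)), r):
--             indices = [positions[i] for i in combo]
--             for subs in itertools.product(*[p[1][1:] for p in indices]):
--                 result = list(word)
--                 for (idx, _), sub in zip(indices, subs):
--                     result[idx] = sub
--                 yield "".join(result)
--
-- def leet_phrase(phrase: str, sep: str = " ") -> Iterator[str]: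
--     """Generate leetspeak variants of a phrase."""
--     words = phrase.split()
--     if not words:
--         yield phrase
--         return
--
--     # Get variants for each word
--     word_variants = [list(leet_word(w)) for w in words]
--
--     # Limit combinations to target ~10B total (was 12, now 3 to reduce by ~22x)
--     max_variants_per_word = 3
--     word_variants = [v[:max_variants_per_word] for v in word_variants]
--
--     # Generate combinations
--     for combo in itertools.product(*word_variants):
--         yield sep.join(combo)
-- ===== SOURCE B (Python) =====
-- LEET_CHAR = {
--     "a": ["a", "@", "4"],
--     "s": ["s", "$", "5"],
--     "e": ["e", "3"],
--     "i": ["i", "1", "!"],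
--     "o": ["o", "0"],
--     "l": ["l", "1"],
--     "t": ["t", "7"],
-- }
--
-- LEET_WORDS = {
--     "pass": ["pass", "p455", "p@$$", "p4$$", "p@55", "pa55", "p@ss", "p4ss"],
--     "password": [
--         "password", "p455word", "p@$$word", "p4$$word", "p@55word",
--         "pa55word", "p@ssword", "passw0rd", "p455w0rd", "p@$$w0rd",
--         "p4ssword", "p4ssw0rd", "p@55w0rd", "pa$$word", "pa55w0rd",
--     ],
--     "passphrase": [
--         "passphrase", "p455phrase", "p@$$phrase", "p4$$phrase",
--         "passphr4se", "p455phr4se", "p@$$phr4se", "p4ssphr4se",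
--         "p@ssphr@se", "p455phr@se", "pa55phrase", "pa55phr4se",
--     ],
--     "bad": ["bad", "b4d", "b@d"],
--     "dumb": ["dumb", "d0mb", "durnb"],
--     "stupid": ["stupid", "stup1d", "5tupid", "5tup1d", "s7upid"],
--     "weak": ["weak", "we4k", "w34k", "w3@k"],
--     "easy": ["easy", "e4sy", "3asy", "34sy", "e@sy"],
--     "simple": ["simple", "s1mple", "5imple", "51mple", "s!mple"],
--     "lame": ["lame", "l4me", "l@me", "1ame"],
--     "this": ["this", "th1s", "7his", "7h1s"],
--     "is": ["is", "1s", "!s"],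
-- }
--
--
-- def _choose(ps, r):
--     """All r-element combinations of ps, in lexicographic order, by recursion."""
--     if r == 0:
--         return [[]]
--     out = []
--     for j in range(len(ps) - r + 1):
--         head = ps[j]
--         for tail in _choose(ps[j + 1:], r - 1):
--             out.append([head] + tail)
--     return out
--
--
-- def _apply(chars, sel):
--     """Apply every substitution assignment for the selected positions, first position slowest."""
--     if not sel:
--         return ["".join(chars)]
--     (idx, opts), rest = sel[0], sel[1:]
--     out = []
--     for sub in opts[1:]:
--         nxt = list(chars)
--         nxt[idx] = sub
--         out.extend(_apply(nxt, rest))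
--     return out
--
--
-- def _leet_word(word):
--     w = word.lower()
--     if w in LEET_WORDS:
--         return list(LEET_WORDS[w])
--     positions = [(i, LEET_CHAR[c.lower()]) for i, c in enumerate(word) if c.lower() in LEET_CHAR]
--     out = [word]
--     for r in range(1, min(5, len(positions) + 1)):
--         for sel in _choose(positions, r):
--             out.extend(_apply(list(word), sel))
--     return out
--
--
-- def leet_phrase(phrase, sep=" "):
--     words = phrase.split()
--     if not words:
--         yield phrase
--         return
--     variant_lists = [_leet_word(w)[:3] for w in words]
--     acc = [[]]
--     for vs in variant_lists:
--         acc = [prev + [v] for prev in acc for v in vs]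
--     for combo in acc:
--         yield sep.join(combo)
-- ===== Notes on version B (the rewrite author's own statement) =====
-- stated objective: alternative
-- what changed: B replaces itertools.combinations/product with a recursive position chooser, a recursive substitution applier, and a breadth-first fold that grows the per-word cartesian product through an accumulator instead of a lazy odometer.
import Mathlib
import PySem

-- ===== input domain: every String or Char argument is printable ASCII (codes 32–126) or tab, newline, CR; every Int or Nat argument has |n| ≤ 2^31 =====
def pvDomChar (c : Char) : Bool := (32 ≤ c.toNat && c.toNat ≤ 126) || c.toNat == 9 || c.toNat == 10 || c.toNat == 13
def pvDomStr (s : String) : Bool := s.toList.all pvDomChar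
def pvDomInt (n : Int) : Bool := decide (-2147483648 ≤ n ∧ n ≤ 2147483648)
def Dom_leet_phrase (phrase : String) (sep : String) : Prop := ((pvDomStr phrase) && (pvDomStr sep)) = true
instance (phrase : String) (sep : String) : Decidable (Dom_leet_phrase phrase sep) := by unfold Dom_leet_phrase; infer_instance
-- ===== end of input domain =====

-- B replaces itertools.combinations/product with a recursive chooser, a recursive substitution
-- applier and a breadth-first fold that grows the cartesian product; same results, objective: alternative.

-- ===== PORT A =====
-- module data constants (verbatim; shared by both ports)
def LEET_CHAR : PySem.Dict Char (List String) := PySem.Dict.ofList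
  [('a', ["a", "@", "4"]), ('s', ["s", "$", "5"]), ('e', ["e", "3"]),
   ('i', ["i", "1", "!"]), ('o', ["o", "0"]), ('l', ["l", "1"]), ('t', ["t", "7"])]

def LEET_WORDS : PySem.Dict String (List String) := PySem.Dict.ofList
  [("pass", ["pass", "p455", "p@$$", "p4$$", "p@55", "pa55", "p@ss", "p4ss"]),
   ("password",
    ["password", "p455word", "p@$$word", "p4$$word", "p@55word",
     "pa55word", "p@ssword", "passw0rd", "p455w0rd", "p@$$w0rd",
     "p4ssword", "p4ssw0rd", "p@55w0rd", "pa$$word", "pa55w0rd"]),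
   ("passphrase",
    ["passphrase", "p455phrase", "p@$$phrase", "p4$$phrase",
     "passphr4se", "p455phr4se", "p@$$phr4se", "p4ssphr4se",
     "p@ssphr@se", "p455phr@se", "pa55phrase", "pa55phr4se"]),
   ("bad", ["bad", "b4d", "b@d"]),
   ("dumb", ["dumb", "d0mb", "durnb"]),
   ("stupid", ["stupid", "stup1d", "5tupid", "5tup1d", "s7upid"]),
   ("weak", ["weak", "we4k", "w34k", "w3@k"]),
   ("easy", ["easy", "e4sy", "3asy", "34sy", "e@sy"]),
   ("simple", ["simple", "s1mple", "5imple", "51mple", "s!mple"]),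
   ("lame", ["lame", "l4me", "l@me", "1ame"]),
   ("this", ["this", "th1s", "7his", "7h1s"]),
   ("is", ["is", "1s", "!s"])]

-- '[(i, LEET_CHAR[c.lower()]) for i, c in enumerate(word) if c.lower() in LEET_CHAR]'
-- (the identical comprehension appears in both Pythons; membership test + lookup = filterMap of get?)
def leetPositions (word : String) : List (Int × List String) :=
  (PySem.List.enumerate word.toList 0).filterMap (fun p =>
    (LEET_CHAR.get? (PySem.Chars.lowerChar p.2)).map (fun subs => (p.1, subs)))

-- port of itertools.combinations(l, r): r-element combinations in lexicographic order
def pyCombinations {α : Type} (l : List α) (r : Nat) : List (List α) :=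
  match r, l with
  | 0, _ => [[]]
  | _ + 1, [] => []
  | r + 1, x :: xs => (pyCombinations xs r).map (fun c => x :: c) ++ pyCombinations xs (r + 1)
termination_by l.length

-- port of itertools.product(*ls): rightmost factor varies fastest
def pyProduct {α : Type} (ls : List (List α)) : List (List α) :=
  match ls with
  | [] => [[]]
  | l :: rest => l.flatMap (fun x => (pyProduct rest).map (fun t => x :: t))

-- A's generator leet_word, as the list of its yields
def leet_word_A (word : String) : List String :=
  match LEET_WORDS.get? (PySem.Str.lower word) with
  | some vs => vs
  | none =>
    let positions := leetPositions word
    if positions = [] then [word]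
    else
      -- positions[i] is always in range (indices come from enumerate), so the default is never used
      [word] ++ (PySem.List.pyRange 1 (min 5 ((positions.length : Int) + 1)) 1).flatMap (fun r =>
        (pyCombinations (PySem.List.pyRange 0 (positions.length : Int) 1) r.toNat).flatMap (fun combo =>
          let indices := combo.map (fun i => PySem.List.pyGetD positions i (0, []))
          (pyProduct (indices.map (fun p => PySem.List.slice p.2 (some 1) none))).map (fun subs =>
            PySem.Str.join "" ((indices.zip subs).foldl (fun res q => res.set q.1.1.toNat q.2)
              (word.toList.map (fun c => String.ofList [c]))))))

def leet_phrase (phrase : String) (sep : String) : List String :=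
  let words := PySem.Str.split₀ phrase
  if words = [] then [phrase]
  else
    let word_variants := words.map (fun w => leet_word_A w)
    let word_variants2 := word_variants.map (fun v => PySem.List.slice v none (some 3))
    (pyProduct word_variants2).map (fun combo => PySem.Str.join sep combo)

-- ===== PORT B =====
-- B's _choose: loop over the first index j, recurse on the slice ps[j+1:]
def chooseB (ps : List (Int × List String)) (r : Nat) : List (List (Int × List String)) :=
  match r with
  | 0 => [[]]
  | r + 1 =>
    (PySem.List.pyRange 0 ((ps.length : Int) - r) 1).flatMap (fun j =>
      (chooseB (PySem.List.slice ps (some (j + 1)) none) r).map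
        (fun t => PySem.List.pyGetD ps j (0, []) :: t))

-- B's _apply: recurse over the selected positions, first position's options vary slowest
def applyB (chars : List String) (sel : List (Int × List String)) : List String :=
  match sel with
  | [] => [PySem.Str.join "" chars]
  | (idx, opts) :: rest =>
    (PySem.List.slice opts (some 1) none).flatMap (fun sub =>
      applyB (chars.set idx.toNat sub) rest)

def leet_word_B (word : String) : List String :=
  match LEET_WORDS.get? (PySem.Str.lower word) with
  | some vs => vs
  | none =>
    let positions := leetPositions word
    (PySem.List.pyRange 1 (min 5 ((positions.length : Int) + 1)) 1).foldl (fun out r =>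
      out ++ (chooseB positions r.toNat).flatMap (fun sel =>
        applyB (word.toList.map (fun c => String.ofList [c])) sel)) [word]

def leet_phrase_alt (phrase : String) (sep : String) : List String :=
  let words := PySem.Str.split₀ phrase
  if words = [] then [phrase]
  else
    let variantLists := words.map (fun w => PySem.List.slice (leet_word_B w) none (some 3))
    (variantLists.foldl (fun acc vs => acc.flatMap (fun prev => vs.map (fun v => prev ++ [v]))) [[]]).map
      (fun combo => PySem.Str.join sep combo)

-- ===== PRECONDITION & SPEC =====
def Spec_leet_phrase (phrase : String) (sep : String) (out : List String) : Prop := out = leet_phrase_alt phrase sep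
instance (phrase : String) (sep : String) (out : List String) : Decidable (Spec_leet_phrase phrase sep out) := by unfold Spec_leet_phrase; infer_instance

-- ===== CLAIM (what is proved, stated in full; the proofs are below) =====
def Claim_equal_leet_phrase : Prop := ∀ (phrase : String) (sep : String), Dom_leet_phrase phrase sep → Spec_leet_phrase phrase sep (leet_phrase phrase sep)

-- ===== LEMMAS AND PROOFS =====

theorem pyCombinations_nil_of_lt {α : Type} : ∀ (l : List α) (r : Nat), l.length < r → pyCombinations l r = [] := by
  intro l
  induction l with
  | nil => intro r h; cases r with
    | zero => simp at h
    | succ r => simp [pyCombinations]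
  | cons x xs ih =>
    intro r h
    cases r with
    | zero => simp at h
    | succ r =>
      simp only [List.length_cons] at h
      simp only [pyCombinations]
      rw [ih r (by omega), ih (r+1) (by omega)]
      simp

theorem pyCombinations_map {α β : Type} (f : α → β) :
    ∀ (l : List α) (r : Nat), pyCombinations (l.map f) r = (pyCombinations l r).map (List.map f) := by
  intro l
  induction l with
  | nil => intro r; cases r <;> simp [pyCombinations]
  | cons x xs ih =>
    intro r
    cases r with
    | zero => simp [pyCombinations]
    | succ r =>
      simp only [List.map_cons, pyCombinations, ih, List.map_append, List.map_map]
      simp [Function.comp_def]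

theorem foldl_prod {α : Type} :
    ∀ (ls : List (List α)) (acc : List (List α)),
      ls.foldl (fun acc vs => acc.flatMap (fun prev => vs.map (fun v => prev ++ [v]))) acc
      = acc.flatMap (fun prev => (pyProduct ls).map (fun t => prev ++ t)) := by
  intro ls
  induction ls with
  | nil => intro acc; simp [pyProduct]
  | cons vs ls ih =>
    intro acc
    simp only [List.foldl_cons]
    rw [ih]
    simp [pyProduct, List.flatMap_map, List.map_flatMap, List.flatMap_assoc, List.map_map,
      Function.comp_def]

theorem applyA_eq :
    ∀ (sel : List (Int × List String)) (chars : List String),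
      (pyProduct (sel.map (fun p => PySem.List.slice p.2 (some 1) none))).map (fun subs =>
        PySem.Str.join "" ((sel.zip subs).foldl (fun res q => res.set q.1.1.toNat q.2) chars))
      = applyB chars sel := by
  intro sel
  induction sel with
  | nil => intro chars; simp [pyProduct, applyB]
  | cons p rest ih =>
    intro chars
    obtain ⟨idx, opts⟩ := p
    simp only [List.map_cons, pyProduct, applyB, List.map_flatMap, List.map_map]
    congr 1
    funext sub
    simp only [Function.comp_def, List.zip_cons_cons, List.foldl_cons]
    exact ih _

theorem chooseB_eq : ∀ (r : Nat) (ps : List (Int × List String)), chooseB ps r = pyCombinations ps r := by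
  intro r
  induction r with
  | zero => intro ps; simp [chooseB, pyCombinations]
  | succ r ihr =>
    intro ps
    induction ps with
    | nil =>
      simp only [chooseB, List.length_nil]
      rw [PySem.List.pyRange_one_eq_nil (by omega : ((0:Nat):Int) - r ≤ 0)]
      simp [pyCombinations]
    | cons x xs ihps =>
      simp only [chooseB, List.length_cons]
      by_cases h : ((xs.length + 1 : Nat) : Int) - r ≤ 0
      · rw [PySem.List.pyRange_one_eq_nil h]
        have h1 : xs.length < r := by omega
        simp [pyCombinations, pyCombinations_nil_of_lt xs r h1,
          pyCombinations_nil_of_lt xs (r + 1) (by omega)]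
      · rw [PySem.List.pyRange_one_cons (by omega : (0:Int) < ((xs.length + 1 : Nat) : Int) - r)]
        simp only [List.flatMap_cons]
        simp only [pyCombinations]
        congr 1
        · -- j = 0 summand
          have e0 : ((0:Int) + 1) = ((1 : Nat) : Int) := by norm_num
          rw [e0, PySem.List.slice_from_natCast]
          rw [ihr]
          have g0 : PySem.List.pyGetD (x :: xs) (0 : Int) (0, ([] : List String)) = x := by
            simp [pysem]
          rw [g0]
          rfl
        · -- j ≥ 1 summands
          rw [← ihps]
          simp only [chooseB]
          rw [show ((0:Int) + 1) = 1 from by norm_num]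
          rw [PySem.List.pyRange_one 1 (((xs.length + 1 : Nat) : Int) - r),
              PySem.List.pyRange_one 0 (((xs.length : Nat) : Int) - r)]
          have elen : ((((xs.length + 1 : Nat) : Int) - r) - 1).toNat = (((xs.length : Nat) : Int) - r - 0).toNat := by
            omega
          rw [List.flatMap_map, List.flatMap_map, elen]
          refine congrFun (congrArg List.flatMap (funext fun k => ?_)) _
          have e2 : (1 + (k:Int) + 1) = ((k + 2 : Nat) : Int) := by omega
          have e3 : (0 + (k:Int) + 1) = ((k + 1 : Nat) : Int) := by omega
          have e4 : (1 + (k:Int)) = ((k + 1 : Nat) : Int) := by omega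
          have e5 : (0 + (k:Int)) = ((k : Nat) : Int) := by omega
          rw [e2, e3, e4, e5, PySem.List.slice_from_natCast, PySem.List.slice_from_natCast,
              PySem.List.pyGetD_natCast, PySem.List.pyGetD_natCast]
          simp

theorem leet_word_eq (word : String) : leet_word_A word = leet_word_B word := by
  simp only [leet_word_A, leet_word_B]
  cases hw : PySem.Dict.get? LEET_WORDS (PySem.Str.lower word) with
  | some vs => rfl
  | none =>
    set positions := leetPositions word with hpos
    rw [PySem.List.foldl_append_eq_flatMap]
    by_cases hp : positions = []
    · rw [if_pos hp, hp]
      simp only [List.length_nil, Nat.cast_zero, zero_add]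
      norm_num
    · rw [if_neg hp]
      dsimp only
      congr 1
      refine congrFun (congrArg List.flatMap (funext fun r => ?_)) _
      rw [chooseB_eq]
      have hmap : (PySem.List.pyRange 0 ((positions.length : Nat) : Int) 1).map
          (fun i => PySem.List.pyGetD positions i (0, ([] : List String))) = positions :=
        PySem.List.map_pyGetD_pyRange_zero' positions (0, ([] : List String))
      conv_rhs => rw [← hmap, pyCombinations_map, List.flatMap_map]
      refine congrFun (congrArg List.flatMap (funext fun combo => ?_)) _
      exact applyA_eq _ _

theorem leet_phrase_eq (phrase : String) (sep : String) : leet_phrase phrase sep = leet_phrase_alt phrase sep := by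
  simp only [leet_phrase, leet_phrase_alt]
  by_cases hw : PySem.Str.split₀ phrase = []
  · rw [if_pos hw, if_pos hw]
  · rw [if_neg hw, if_neg hw]
    rw [foldl_prod]
    simp only [List.map_map, Function.comp_def, leet_word_eq]
    simp

-- ===== VERDICT (by name: the statement is the Claim_ definition above) =====
theorem leet_phrase_spec : Claim_equal_leet_phrase := by
  intro phrase sep _
  unfold Spec_leet_phrase
  exact leet_phrase_eq phrase sep
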